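-- pv_equiv track=rewrite | github.com/PLeVasseur/eclipse-iceoryx2-actionanable-safety-certification | tools/map_misra_to_fls.py | determine_applicability
-- ===== SOURCE A (Python) =====
-- def determine_applicability(
--     concept_names: list[str],
--     concepts: dict[str, dict],
--     category_hint_all: str | None,
--     category_hint_safe: str | None
-- ) -> tuple[str, str]:
--     """
--     Determine applicability values based on matched concepts.
--     Returns (applicability_all_rust, applicability_safe_rust)
--     """
--     if not concept_names:
--         return "unmapped", "unmapped"
--
--     # Collect applicabilities from all matched concepts
--     all_rust_apps = []
--     safe_rust_apps = []
--
--     for name in concept_names: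
--         concept = concepts.get(name, {})
--         all_app = concept.get("typical_applicability_all_rust")
--         safe_app = concept.get("typical_applicability_safe_rust")
--         if all_app:
--             all_rust_apps.append(all_app)
--         if safe_app:
--             safe_rust_apps.append(safe_app)
--
--     # Priority: not_applicable > rust_prevents > partial > direct > unmapped
--     priority = ["not_applicable", "rust_prevents", "partial", "direct", "unmapped"]
--
--     def pick_best(apps: list[str], hint: str | None) -> str:
--         if not apps:
--             return hint or "unmapped"
--         # Return the highest priority value found
--         for p in priority:
--             if p in apps:
--                 return p
--         return hint or "unmapped"
--
--     return (
--         pick_best(all_rust_apps, category_hint_all),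
--         pick_best(safe_rust_apps, category_hint_safe)
--     )
-- ===== SOURCE B (Python) =====
-- def determine_applicability(
--     concept_names,
--     concepts,
--     category_hint_all,
--     category_hint_safe,
-- ):
--     if not concept_names:
--         return "unmapped", "unmapped"
--
--     priority = ["not_applicable", "rust_prevents", "partial", "direct", "unmapped"]
--     rank = {p: i for i, p in enumerate(priority)}
--
--     best_all = None
--     best_safe = None
--     for name in concept_names:
--         concept = concepts.get(name, {})
--         a = concept.get("typical_applicability_all_rust")
--         s = concept.get("typical_applicability_safe_rust")
--         if a in rank and (best_all is None or rank[a] < best_all):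
--             best_all = rank[a]
--         if s in rank and (best_safe is None or rank[s] < best_safe):
--             best_safe = rank[s]
--
--     out_all = priority[best_all] if best_all is not None else (category_hint_all or "unmapped")
--     out_safe = priority[best_safe] if best_safe is not None else (category_hint_safe or "unmapped")
--     return out_all, out_safe
-- ===== Notes on version B (the rewrite author's own statement) =====
-- stated objective: simpler
-- what changed: Replaces the two-phase collect-lists-then-scan-priority-list-per-category structure with a single fused pass that keeps only a running minimum priority rank per category (via a rank dict), rendering the result at the end; no intermediate applicability lists and no inner scan over the priority list.
import Mathlib
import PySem

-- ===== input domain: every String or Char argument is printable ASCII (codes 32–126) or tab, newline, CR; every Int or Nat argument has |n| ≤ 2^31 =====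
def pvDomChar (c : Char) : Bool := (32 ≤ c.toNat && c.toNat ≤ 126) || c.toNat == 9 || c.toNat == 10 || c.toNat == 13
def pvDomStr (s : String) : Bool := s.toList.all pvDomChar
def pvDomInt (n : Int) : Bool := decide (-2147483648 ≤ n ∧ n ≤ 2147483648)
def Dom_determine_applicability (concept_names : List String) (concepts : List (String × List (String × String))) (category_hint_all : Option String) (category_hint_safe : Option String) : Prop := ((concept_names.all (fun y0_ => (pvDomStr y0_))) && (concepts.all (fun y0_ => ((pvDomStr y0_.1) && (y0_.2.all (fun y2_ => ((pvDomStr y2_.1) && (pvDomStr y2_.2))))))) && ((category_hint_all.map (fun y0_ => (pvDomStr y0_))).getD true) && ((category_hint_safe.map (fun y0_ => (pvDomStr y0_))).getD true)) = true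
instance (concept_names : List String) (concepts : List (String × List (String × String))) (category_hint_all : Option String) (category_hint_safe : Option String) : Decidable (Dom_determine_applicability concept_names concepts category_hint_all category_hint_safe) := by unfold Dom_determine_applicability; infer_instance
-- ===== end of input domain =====

-- B replaces A's collect-two-lists-then-scan-the-priority-list structure by one fused pass
-- keeping only a running minimum priority rank per category (objective: simpler).

-- ===== PORT A =====
-- d.get(k) on an inner dict (first match, none = absent)
def pvDictGet (pairs : List (String × String)) (k : String) : Option String :=
  (pairs.find? (fun p => p.1 == k)).map (·.2)

-- concepts.get(name, {})
def pvConceptsGet (concepts : List (String × List (String × String))) (k : String) : List (String × String) :=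
  ((concepts.find? (fun p => p.1 == k)).map (·.2)).getD []

-- Python truthiness of `all_app` (None or "" falsy)
def pvTruthy (o : Option String) : Bool :=
  match o with
  | some s => !(s == "")
  | none => false

def pvPriority : List String := ["not_applicable", "rust_prevents", "partial", "direct", "unmapped"]

-- `hint or "unmapped"`
def pvHintOr (hint : Option String) : String :=
  match hint with
  | some h => if h == "" then "unmapped" else h
  | none => "unmapped"

-- pick_best: first priority value occurring in apps, else hint or "unmapped"
def pick_best (apps : List String) (hint : Option String) : String :=
  if apps.isEmpty then pvHintOr hint
  else
    match pvPriority.find? (fun p => apps.contains p) with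
    | some p => p
    | none => pvHintOr hint

-- the body of A's for-loop: append truthy applicabilities to the two lists
def aStep (concepts : List (String × List (String × String)))
    (st : List String × List String) (name : String) : List String × List String :=
  let concept := pvConceptsGet concepts name
  let all_app := pvDictGet concept "typical_applicability_all_rust"
  let safe_app := pvDictGet concept "typical_applicability_safe_rust"
  let st1 := if pvTruthy all_app then (st.1 ++ [all_app.getD ""], st.2) else st
  if pvTruthy safe_app then (st1.1, st1.2 ++ [safe_app.getD ""]) else st1

def determine_applicability (concept_names : List String) (concepts : List (String × List (String × String))) (category_hint_all : Option String) (category_hint_safe : Option String) : String × String :=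
  if concept_names.isEmpty then ("unmapped", "unmapped")
  else
    let acc := concept_names.foldl (aStep concepts) ([], [])
    (pick_best acc.1 category_hint_all, pick_best acc.2 category_hint_safe)

-- ===== PORT B =====
def bDictGet (pairs : List (String × String)) (k : String) : Option String :=
  (pairs.find? (fun p => p.1 == k)).map (·.2)

def bConceptsGet (concepts : List (String × List (String × String))) (k : String) : List (String × String) :=
  ((concepts.find? (fun p => p.1 == k)).map (·.2)).getD []

def bPriority : List String := ["not_applicable", "rust_prevents", "partial", "direct", "unmapped"]

-- rank = {p: i for i, p in enumerate(priority)}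
def bRank : PySem.Dict String Nat :=
  PySem.Dict.mk [("not_applicable", 0), ("rust_prevents", 1), ("partial", 2), ("direct", 3), ("unmapped", 4)]

-- `if x in rank and (best is None or rank[x] < best): best = rank[x]`
def bUpd (best : Option Nat) (o : Option String) : Option Nat :=
  match o.bind (fun a => bRank.get? a) with
  | some r => if best.all (fun cur => r < cur) then some r else best
  | none => best

def bHintOr (hint : Option String) : String :=
  match hint with
  | some h => if h == "" then "unmapped" else h
  | none => "unmapped"

-- priority[best] if best is not None else (hint or "unmapped")
def bRender (best : Option Nat) (hint : Option String) : String :=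
  match best with
  | some r => (bPriority[r]?).getD "unmapped"
  | none => bHintOr hint

def bStep (concepts : List (String × List (String × String)))
    (st : Option Nat × Option Nat) (name : String) : Option Nat × Option Nat :=
  let concept := bConceptsGet concepts name
  (bUpd st.1 (bDictGet concept "typical_applicability_all_rust"),
   bUpd st.2 (bDictGet concept "typical_applicability_safe_rust"))

def determine_applicability_alt (concept_names : List String) (concepts : List (String × List (String × String))) (category_hint_all : Option String) (category_hint_safe : Option String) : String × String :=
  if concept_names.isEmpty then ("unmapped", "unmapped")
  else
    let best := concept_names.foldl (bStep concepts) (none, none)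
    (bRender best.1 category_hint_all, bRender best.2 category_hint_safe)

-- ===== PRECONDITION & SPEC =====
def Spec_determine_applicability (concept_names : List String) (concepts : List (String × List (String × String))) (category_hint_all : Option String) (category_hint_safe : Option String) (out : String × String) : Prop := out = determine_applicability_alt concept_names concepts category_hint_all category_hint_safe
instance (concept_names : List String) (concepts : List (String × List (String × String))) (category_hint_all : Option String) (category_hint_safe : Option String) (out : String × String) : Decidable (Spec_determine_applicability concept_names concepts category_hint_all category_hint_safe out) := by unfold Spec_determine_applicability; infer_instance

-- ===== CLAIM (what is proved, stated in full; the proofs are below) =====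
def Claim_equal_determine_applicability : Prop := ∀ (concept_names : List String) (concepts : List (String × List (String × String))) (category_hint_all : Option String) (category_hint_safe : Option String), Dom_determine_applicability concept_names concepts category_hint_all category_hint_safe → Spec_determine_applicability concept_names concepts category_hint_all category_hint_safe (determine_applicability concept_names concepts category_hint_all category_hint_safe)

-- ===== LEMMAS AND PROOFS =====

-- the minimum priority rank occurring in a list of applicability strings
def fMin (la : List String) : Option Nat :=
  if la.contains "not_applicable" then some 0
  else if la.contains "rust_prevents" then some 1
  else if la.contains "partial" then some 2
  else if la.contains "direct" then some 3
  else if la.contains "unmapped" then some 4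
  else none

theorem pick_eq (apps : List String) (hint : Option String) :
    pick_best apps hint = bRender (fMin apps) hint := by
  cases apps with
  | nil => cases hint <;> simp [pick_best, fMin, bRender, pvHintOr, bHintOr]
  | cons a rest =>
    simp only [pick_best, fMin, bRender, pvPriority, bPriority, List.isEmpty_cons,
      List.find?, pvHintOr, bHintOr, if_false, Bool.false_eq_true]
    split_ifs <;> simp_all

set_option maxHeartbeats 1000000 in
theorem fMin_step (o : Option String) (la : List String) :
    fMin (la ++ (if pvTruthy o then [o.getD ""] else [])) = bUpd (fMin la) o := by
  cases o with
  | none => simp [pvTruthy, bUpd]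
  | some a =>
    by_cases ha : a = ""
    · subst ha
      have hget : bRank.get? "" = none := by rfl
      simp [pvTruthy, bUpd, hget]
    · have ht : pvTruthy (some a) = true := by simp [pvTruthy, ha]
      rw [ht]
      simp only [if_true, Option.getD_some]
      by_cases h0 : a = "not_applicable"
      · subst h0
        have hget : bRank.get? "not_applicable" = some 0 := by rfl
        simp only [bUpd, Option.bind_some, hget, fMin, List.contains_append,
          List.contains_cons, List.contains_nil]
        norm_num
        split_ifs <;> simp_all
      by_cases h1 : a = "rust_prevents"
      · subst h1
        have hget : bRank.get? "rust_prevents" = some 1 := by rfl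
        simp only [bUpd, Option.bind_some, hget, fMin, List.contains_append,
          List.contains_cons, List.contains_nil]
        norm_num
        split_ifs <;> simp_all
      by_cases h2 : a = "partial"
      · subst h2
        have hget : bRank.get? "partial" = some 2 := by rfl
        simp only [bUpd, Option.bind_some, hget, fMin, List.contains_append,
          List.contains_cons, List.contains_nil]
        norm_num
        split_ifs <;> simp_all
      by_cases h3 : a = "direct"
      · subst h3
        have hget : bRank.get? "direct" = some 3 := by rfl
        simp only [bUpd, Option.bind_some, hget, fMin, List.contains_append,
          List.contains_cons, List.contains_nil]
        norm_num
        split_ifs <;> simp_all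
      by_cases h4 : a = "unmapped"
      · subst h4
        have hget : bRank.get? "unmapped" = some 4 := by rfl
        simp only [bUpd, Option.bind_some, hget, fMin, List.contains_append,
          List.contains_cons, List.contains_nil]
        norm_num
        split_ifs <;> simp_all
      have hget : bRank.get? a = none := by
        simp [bRank, PySem.Dict.get?, Ne.symm h0, Ne.symm h1, Ne.symm h2, Ne.symm h3, Ne.symm h4]
      simp only [bUpd, Option.bind_some, hget, fMin, List.contains_append,
        List.contains_cons, List.contains_nil]
      simp [Ne.symm h0, Ne.symm h1, Ne.symm h2, Ne.symm h3, Ne.symm h4]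

theorem aStep_eq (concepts : List (String × List (String × String))) (st : List String × List String)
    (name : String) :
    aStep concepts st name =
      (st.1 ++ (if pvTruthy (pvDictGet (pvConceptsGet concepts name) "typical_applicability_all_rust")
                then [(pvDictGet (pvConceptsGet concepts name) "typical_applicability_all_rust").getD ""] else []),
       st.2 ++ (if pvTruthy (pvDictGet (pvConceptsGet concepts name) "typical_applicability_safe_rust")
                then [(pvDictGet (pvConceptsGet concepts name) "typical_applicability_safe_rust").getD ""] else [])) := by
  simp only [aStep]
  split_ifs <;> simp

theorem bDictGet_eq (pairs : List (String × String)) (k : String) :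
    bDictGet pairs k = pvDictGet pairs k := rfl

theorem bConceptsGet_eq (concepts : List (String × List (String × String))) (k : String) :
    bConceptsGet concepts k = pvConceptsGet concepts k := rfl

theorem loop_inv (concepts : List (String × List (String × String))) (names : List String) :
    ∀ (la ls : List String),
      names.foldl (bStep concepts) (fMin la, fMin ls) =
        (fMin (names.foldl (aStep concepts) (la, ls)).1,
         fMin (names.foldl (aStep concepts) (la, ls)).2) := by
  induction names with
  | nil => intro la ls; simp
  | cons n rest ih =>
    intro la ls
    rw [List.foldl_cons, List.foldl_cons, aStep_eq]
    have hb : bStep concepts (fMin la, fMin ls) n =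
        (fMin (la ++ (if pvTruthy (pvDictGet (pvConceptsGet concepts n) "typical_applicability_all_rust")
                then [(pvDictGet (pvConceptsGet concepts n) "typical_applicability_all_rust").getD ""] else [])),
         fMin (ls ++ (if pvTruthy (pvDictGet (pvConceptsGet concepts n) "typical_applicability_safe_rust")
                then [(pvDictGet (pvConceptsGet concepts n) "typical_applicability_safe_rust").getD ""] else []))) := by
      simp only [bStep, bDictGet_eq, bConceptsGet_eq, fMin_step]
    rw [hb, ih]

-- ===== VERDICT (by name: the statement is the Claim_ definition above) =====
theorem determine_applicability_spec : Claim_equal_determine_applicability := by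
  intro concept_names concepts ha hs _
  unfold Spec_determine_applicability determine_applicability determine_applicability_alt
  cases concept_names with
  | nil => rfl
  | cons n rest =>
    simp only [List.isEmpty_cons, if_false, Bool.false_eq_true]
    have h0 : (none : Option Nat) = fMin [] := rfl
    rw [show ((none : Option Nat), (none : Option Nat)) = (fMin [], fMin []) from rfl,
      loop_inv concepts (n :: rest) [] [], pick_eq, pick_eq]
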